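-- pv_equiv track=rewrite | github.com/ch0c0-msk/YandexAlgorithms | 1.0/HW7/taskC.py | findTicketsNumber
-- ===== SOURCE A (Python) =====
-- from heapq import heappop, heappush
--
-- def findTicketsNumber(d, students):
--     events = []
--     START = -1
--     END = 1
--     for i, s in enumerate(students):
--         events.append((s, START, i))
--         events.append((s+d, END, i))
--     events.sort()
--     result = [None]*len(students)
--     heap = list(range(1, len(students) + 1))
--     maxTicketNumber = 0
--     for pos, eventType, idx in events:
--         if eventType == START:
--             nextTicketNumber = heappop(heap)
--             maxTicketNumber = max(nextTicketNumber, maxTicketNumber)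
--             result[idx] = nextTicketNumber
--         elif eventType == END:
--             studentTicketNumber = result[idx]
--             heappush(heap, studentTicketNumber)
--     return result
-- ===== SOURCE B (Python) =====
-- def findTicketsNumber(d, students):
--     # Direct quadratic re-implementation: process students in (start, index) order;
--     # each gets the smallest ticket in 1..n not held by an earlier student whose
--     # interval still covers this start (end >= start, i.e. strict end < start frees).
--     n = len(students)
--     order = sorted(range(n), key=lambda i: (students[i], i))
--     result = [0] * n
--     assigned = []  # (start, ticket) in processing order
--     for i in order:
--         s = students[i]
--         used = {t for st, t in assigned if st + d >= s}
--         t = next(m for m in range(1, n + 1) if m not in used)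
--         result[i] = t
--         assigned.append((s, t))
--     return result
-- ===== Notes on version B (the rewrite author's own statement) =====
-- stated objective: simpler
-- what changed: Replaces the 2n-event build/sort + heap sweep by a direct pass over the students sorted by (start, index): each student gets the smallest ticket in 1..n not held by an earlier student whose end (start+d) is >= this start; no event list and no heaps. Pre_ excludes only d < 0 with a nonempty list, where A raises TypeError (it pushes None onto the int heap).
import Mathlib
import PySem

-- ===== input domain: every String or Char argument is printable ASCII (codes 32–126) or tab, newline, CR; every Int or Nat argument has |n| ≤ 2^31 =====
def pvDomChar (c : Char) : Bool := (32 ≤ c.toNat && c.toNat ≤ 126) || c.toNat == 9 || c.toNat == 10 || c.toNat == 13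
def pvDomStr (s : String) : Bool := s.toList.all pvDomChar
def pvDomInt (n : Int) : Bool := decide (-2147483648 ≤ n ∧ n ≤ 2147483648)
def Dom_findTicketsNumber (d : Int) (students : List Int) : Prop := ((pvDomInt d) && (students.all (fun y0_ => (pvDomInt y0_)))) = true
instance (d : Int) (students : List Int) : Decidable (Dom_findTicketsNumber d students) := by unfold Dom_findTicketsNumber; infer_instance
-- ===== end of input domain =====

-- B replaces A's 2n-event sort + heap sweep by a direct quadratic pass over the students
-- sorted by (start, index) — simpler (no event list, no heaps), not faster.

-- ===== PORT A =====
-- heapq model: the heap is kept as the sorted list of its elements; heappop = take the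
-- head (the minimum, heapq's observable behaviour), heappush = ordered insertion.
def pyHeapPush (t : Int) : List Int → List Int
  | [] => [t]
  | x :: rest => if t ≤ x then t :: x :: rest else x :: pyHeapPush t rest

-- the body of A's `for pos, eventType, idx in events` loop; state = (result, heap, maxTicketNumber)
def aStep (st : List (Option Int) × List Int × Int) (e : Int × Int × Int) :
    List (Option Int) × List Int × Int :=
  if e.2.1 = -1 then
    -- START: heappop (head; nonempty whenever the Python runs, i.e. under Pre_)
    let nextTicketNumber := st.2.1.headD 0
    (st.1.set e.2.2.toNat (some nextTicketNumber), st.2.1.tail, max nextTicketNumber st.2.2)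
  else if e.2.1 = 1 then
    -- END: heappush(heap, result[idx]); result[idx] is always `some` under Pre_
    let studentTicketNumber := (st.1.getD e.2.2.toNat none).getD 0
    (st.1, pyHeapPush studentTicketNumber st.2.1, st.2.2)
  else st

def findTicketsNumber (d : Int) (students : List Int) : List Int :=
  let events := (PySem.List.enumerate students 0).foldl
    (fun ev p => ev ++ [(p.2, (-1 : Int), p.1), (p.2 + d, (1 : Int), p.1)]) []
  let eventsS := PySem.List.sorted events
    (fun e => toLex ((e.1, toLex ((e.2.1, e.2.2) : Int × Int)) : Int × Lex (Int × Int))) false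
  let n := students.length
  let fin := eventsS.foldl aStep
    (List.replicate n none, PySem.List.pyRange 1 ((n : Int) + 1) 1, 0)
  -- every slot is `some` under Pre_; unwrap to fit the declared return type List Int
  fin.1.map (fun o => o.getD 0)

-- ===== PORT B =====
-- the body of B's `for i in order` loop; state = (result, assigned)
def bStep (d : Int) (students : List Int) (st : List Int × List (Int × Int)) (i : Int) :
    List Int × List (Int × Int) :=
  let s := PySem.List.pyGetD students i 0
  let used := PySem.Set.ofList ((st.2.filter (fun q => decide (s ≤ q.1 + d))).map Prod.snd)
  -- next(m for m in range(1, n+1) if m not in used); never exhausted (|used| < n)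
  let t := ((PySem.List.pyRange 1 ((students.length : Int) + 1) 1).filter
      (fun m => !(PySem.Set.contains used m))).headD 0
  (st.1.set i.toNat t, st.2 ++ [(s, t)])

def findTicketsNumber_alt (d : Int) (students : List Int) : List Int :=
  let n := students.length
  let order := PySem.List.sorted (PySem.List.pyRange 0 (n : Int) 1)
    (fun i => toLex ((PySem.List.pyGetD students i 0, i) : Int × Int)) false
  (order.foldl (bStep d students) (List.replicate n 0, [])).1

-- ===== PRECONDITION & SPEC =====
-- Pre_ excludes exactly the inputs on which A raises: for d < 0 and a nonempty list the
-- first sorted event is always an END, so A pushes None onto the int heap (TypeError).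
def Pre_findTicketsNumber (d : Int) (students : List Int) : Prop := 0 ≤ d ∨ students = []
instance (d : Int) (students : List Int) : Decidable (Pre_findTicketsNumber d students) := by
  unfold Pre_findTicketsNumber; infer_instance

def pvWitness_findTicketsNumber : Int × List Int := (2, [3, 1, 3, 2])

def Spec_findTicketsNumber (d : Int) (students : List Int) (out : List Int) : Prop :=
  out = findTicketsNumber_alt d students
instance (d : Int) (students : List Int) (out : List Int) : Decidable (Spec_findTicketsNumber d students out) := by
  unfold Spec_findTicketsNumber; infer_instance

-- ===== CLAIM (what is proved, stated in full; the proofs are below) =====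
def Claim_equal_findTicketsNumber : Prop := ∀ (d : Int) (students : List Int),
  Dom_findTicketsNumber d students → Pre_findTicketsNumber d students →
  Spec_findTicketsNumber d students (findTicketsNumber d students)

-- ===== LEMMAS AND PROOFS =====

-- sort key of an event (pos, type, idx): Python's lexicographic tuple order
def evKey (e : Int × Int × Int) : Lex (Int × Lex (Int × Int)) :=
  toLex ((e.1, toLex ((e.2.1, e.2.2) : Int × Int)) : Int × Lex (Int × Int))

-- sort key of an enumerate pair (i, s): order by (s, i)
def stKey (p : Int × Int) : Lex (Int × Int) := toLex ((p.2, p.1) : Int × Int)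

def allE (d : Int) (students : List Int) : List (Int × Int × Int) :=
  (PySem.List.enumerate students 0).flatMap
    (fun p => [(p.2, (-1 : Int), p.1), (p.2 + d, (1 : Int), p.1)])

def rngT (students : List Int) : List Int :=
  PySem.List.pyRange 1 ((students.length : Int) + 1) 1

def sE (d : Int) (students : List Int) : List (Int × Int × Int) :=
  PySem.List.sorted (allE d students) evKey false

def sY (students : List Int) : List (Int × Int) :=
  PySem.List.sorted (PySem.List.enumerate students 0) stKey false

-- tickets of already-processed students whose END event is still pending (i.e. in E)
def pend (d : Int) (E : List (Int × Int × Int)) (done : List ((Int × Int) × Int)) : List Int :=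
  (done.filter (fun q => decide ((q.1.2 + d, (1 : Int), q.1.1) ∈ E))).map (fun q => q.2)

def resO (students : List Int) (done : List ((Int × Int) × Int)) : List (Option Int) :=
  done.foldl (fun r q => r.set q.1.1.toNat (some q.2)) (List.replicate students.length none)

def resI (students : List Int) (done : List ((Int × Int) × Int)) : List Int :=
  done.foldl (fun r q => r.set q.1.1.toNat q.2) (List.replicate students.length 0)

-- bStep with the start value taken from the pair itself
def pStep (d : Int) (students : List Int) (st : List Int × List (Int × Int)) (p : Int × Int) :
    List Int × List (Int × Int) :=
  let used := PySem.Set.ofList ((st.2.filter (fun q => decide (p.2 ≤ q.1 + d))).map Prod.snd)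
  let t := ((rngT students).filter (fun m => !(PySem.Set.contains used m))).headD 0
  (st.1.set p.1.toNat t, st.2 ++ [(p.2, t)])

theorem evKey_lt_iff (a b : Int × Int × Int) :
    evKey a < evKey b ↔
      (a.1 < b.1 ∨ (a.1 = b.1 ∧ (a.2.1 < b.2.1 ∨ (a.2.1 = b.2.1 ∧ a.2.2 < b.2.2)))) := by
  simp [evKey, Prod.Lex.lt_iff]

theorem evKey_inj (a b : Int × Int × Int) (h : evKey a = evKey b) : a = b := by
  simp [evKey, Prod.ext_iff] at h
  exact Prod.ext h.1 (Prod.ext h.2.1 h.2.2)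

theorem stKey_lt_iff (p q : Int × Int) :
    stKey p < stKey q ↔ (p.2 < q.2 ∨ (p.2 = q.2 ∧ p.1 < q.1)) := by
  simp [stKey, Prod.Lex.lt_iff]

theorem stKey_inj (p q : Int × Int) (h : stKey p = stKey q) : p = q := by
  simp [stKey, Prod.ext_iff] at h
  exact Prod.ext h.2 h.1

theorem heapPush_all_le (t : Int) (l : List Int) (h : ∀ y ∈ l, t ≤ y) :
    pyHeapPush t l = t :: l := by
  cases l with
  | nil => rfl
  | cons x rest => simp [pyHeapPush, h x (by simp)]

theorem heapPush_filter (l : List Int) (hnd : l.Pairwise (· < ·)) (p : Int → Bool) (t : Int)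
    (ht : t ∈ l) (hp : p t = false) :
    pyHeapPush t (l.filter p) = l.filter (fun m => p m || m == t) := by
  induction l with
  | nil => cases ht
  | cons x rest ih =>
    rcases List.pairwise_cons.mp hnd with ⟨hx, hrest⟩
    by_cases hxt : x = t
    · subst hxt
      have h1 : rest.filter (fun m => p m || m == x) = rest.filter p := by
        apply List.filter_congr
        intro m hm
        have : m ≠ x := by have := hx m hm; omega
        simp [this]
      have h2 : pyHeapPush x (rest.filter p) = x :: rest.filter p := by
        apply heapPush_all_le
        intro y hy
        exact le_of_lt (hx y (List.mem_of_mem_filter hy))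
      simp [hp, h1, h2]
    · have ht' : t ∈ rest := by
        rcases List.mem_cons.mp ht with h | h
        · exact absurd h.symm hxt
        · exact h
      have hxlt : x < t := hx t ht'
      by_cases hpx : p x = true
      · have : ¬ (t ≤ x) := by omega
        simp [hpx, pyHeapPush, this, ih hrest ht',
          show (x == t) = false by simp [hxt]]
      · simp at hpx
        simp [hpx, ih hrest ht', show (x == t) = false by simp [hxt]]

theorem filter_cons_tail (l : List Int) (hnd : l.Pairwise (· < ·)) (p : Int → Bool) (t : Int)
    (rest : List Int) (h : l.filter p = t :: rest) :
    rest = l.filter (fun m => p m && !(m == t)) := by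
  induction l generalizing rest with
  | nil => simp at h
  | cons x l' ih =>
    rcases List.pairwise_cons.mp hnd with ⟨hx, hl'⟩
    by_cases hpx : p x = true
    · rw [List.filter_cons_of_pos hpx] at h
      obtain ⟨hxt, hrest⟩ : x = t ∧ l'.filter p = rest := by
        constructor <;> [exact (List.cons.injEq .. ▸ h).1; exact (List.cons.injEq .. ▸ h).2]
      subst hxt
      have h1 : l'.filter (fun m => p m && !(m == x)) = l'.filter p := by
        apply List.filter_congr
        intro m hm
        have : m ≠ x := by have := hx m hm; omega
        simp [this]
      simp [hpx, h1, hrest.symm]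
    · simp at hpx
      rw [List.filter_cons_of_neg (by simp [hpx])] at h
      rw [List.filter_cons_of_neg (by simp [hpx])]
      exact ih hl' rest h

theorem length_foldl_set {β : Type} (l : List ((Int × Int) × Int)) (r0 : List β)
    (g : ((Int × Int) × Int) → β) :
    (l.foldl (fun r q => r.set q.1.1.toNat (g q)) r0).length = r0.length := by
  induction l generalizing r0 with
  | nil => rfl
  | cons x l' ih => simp [ih]

theorem resO_length (students : List Int) (done : List ((Int × Int) × Int)) :
    (resO students done).length = students.length := by
  simpa using length_foldl_set done (List.replicate students.length none) (fun q => some q.2)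

theorem resO_append (students : List Int) (done : List ((Int × Int) × Int))
    (x : (Int × Int) × Int) :
    resO students (done ++ [x]) = (resO students done).set x.1.1.toNat (some x.2) := by
  simp [resO]

theorem resI_append (students : List Int) (done : List ((Int × Int) × Int))
    (x : (Int × Int) × Int) :
    resI students (done ++ [x]) = (resI students done).set x.1.1.toNat x.2 := by
  simp [resI]

theorem map_getD_foldl (l : List ((Int × Int) × Int)) (r0 : List (Option Int)) :
    (l.foldl (fun r q => r.set q.1.1.toNat (some q.2)) r0).map (fun o => o.getD 0)
      = l.foldl (fun r q => r.set q.1.1.toNat q.2) (r0.map (fun o => o.getD 0)) := by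
  induction l generalizing r0 with
  | nil => rfl
  | cons x l' ih => simp [ih, List.map_set]

theorem map_getD_resO (students : List Int) (done : List ((Int × Int) × Int)) :
    (resO students done).map (fun o => o.getD 0) = resI students done := by
  simpa [resO, resI, List.map_replicate] using
    map_getD_foldl done (List.replicate students.length none)

theorem getD_resO (students : List Int) (done : List ((Int × Int) × Int))
    (q : (Int × Int) × Int) (hq : q ∈ done)
    (hinj : ∀ a ∈ done, ∀ b ∈ done, a.1.1 = b.1.1 → a = b)
    (hrange : ∀ a ∈ done, 0 ≤ a.1.1 ∧ a.1.1.toNat < students.length) :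
    (resO students done).getD q.1.1.toNat none = some q.2 := by
  induction done using List.reverseRecOn with
  | nil => cases hq
  | append_singleton l x ih =>
    rw [resO_append]
    have hlen : (resO students l).length = students.length := resO_length ..
    have hxr := hrange x (by simp)
    by_cases hqx : q = x
    · subst hqx
      rw [List.getD_eq_getElem?_getD, List.getElem?_set_self (by omega), Option.getD_some]
    · have hql : q ∈ l := by
        rcases List.mem_append.mp hq with h | h
        · exact h
        · simp at h; exact absurd h hqx
      have hqr := hrange q hq
      have hne : x.1.1.toNat ≠ q.1.1.toNat := by
        intro hc
        have : x.1.1 = q.1.1 := by omega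
        exact hqx ((hinj q hq x (by simp) this.symm).symm ▸ rfl)
      rw [List.getD_eq_getElem?_getD, List.getElem?_set_ne hne, ← List.getD_eq_getElem?_getD]
      exact ih hql
        (fun a ha b hb => hinj a (by simp [ha]) b (by simp [hb]))
        (fun a ha => hrange a (by simp [ha]))

theorem aStep_start (r : List (Option Int)) (h : List Int) (m : Int) (s i : Int) :
    aStep (r, h, m) (s, -1, i)
      = (r.set i.toNat (some (h.headD 0)), h.tail, max (h.headD 0) m) := by
  simp [aStep]

theorem aStep_end (r : List (Option Int)) (h : List Int) (m : Int) (s i : Int) :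
    aStep (r, h, m) (s, 1, i)
      = (r, pyHeapPush ((r.getD i.toNat none).getD 0) h, m) := by
  norm_num [aStep]

theorem enum_spec (students : List Int) (p : Int × Int)
    (h : p ∈ PySem.List.enumerate students 0) :
    0 ≤ p.1 ∧ p.1.toNat < students.length ∧ PySem.List.pyGetD students p.1 0 = p.2 := by
  rcases (PySem.List.mem_enumerate_iff students 0 p).mp h with ⟨k, hk, hp⟩
  subst hp
  refine ⟨by positivity, by simpa using hk, ?_⟩
  simp [PySem.List.pyGetD_natCast, List.getD_eq_getElem?_getD, List.getElem?_eq_getElem hk]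

theorem enum_fst_nodup (students : List Int) :
    ((PySem.List.enumerate students 0).map Prod.fst).Nodup := by
  rw [PySem.List.map_fst_enumerate]
  exact PySem.List.nodup_pyRange_one ..

theorem enum_nodup (students : List Int) : (PySem.List.enumerate students 0).Nodup :=
  (enum_fst_nodup students).of_map

theorem allE_nodup (d : Int) (students : List Int) : (allE d students).Nodup := by
  rw [allE, List.nodup_flatMap]
  constructor
  · intro p _
    simp
  · apply (PySem.List.pairwise_lt_enumerate students 0).imp
    intro p q hlt
    intro e he1 he2
    simp only [List.mem_cons, List.not_mem_nil, or_false] at he1 he2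
    have hne : p.1 ≠ q.1 := ne_of_lt hlt
    rcases he1 with h | h <;> rcases he2 with h' | h' <;>
      (subst h; exact hne (congrArg (fun z => z.2.2) h'))

theorem sE_pairwise (d : Int) (students : List Int) :
    (sE d students).Pairwise (fun a b => evKey a < evKey b) := by
  have hperm : (sE d students).Perm (allE d students) := PySem.List.sorted_perm ..
  have hnd : (sE d students).Nodup := (hperm.nodup_iff).mpr (allE_nodup d students)
  have hle : (sE d students).Pairwise (fun a b => evKey a ≤ evKey b) :=
    PySem.List.sorted_pairwise ..
  apply (hle.and hnd).imp
  rintro a b ⟨h1, h2⟩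
  exact lt_of_le_of_ne h1 (fun hc => h2 (evKey_inj a b hc))

theorem sY_pairwise (students : List Int) :
    (sY students).Pairwise (fun a b => stKey a < stKey b) := by
  have hperm : (sY students).Perm (PySem.List.enumerate students 0) := PySem.List.sorted_perm ..
  have hnd : (sY students).Nodup := (hperm.nodup_iff).mpr (enum_nodup students)
  have hle : (sY students).Pairwise (fun a b => stKey a ≤ stKey b) :=
    PySem.List.sorted_pairwise ..
  apply (hle.and hnd).imp
  rintro a b ⟨h1, h2⟩
  exact lt_of_le_of_ne h1 (fun hc => h2 (stKey_inj a b hc))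

theorem mem_suffix_of_key_gt (d : Int) (students : List Int) (P E : List (Int × Int × Int))
    (h : sE d students = P ++ E) (x y : Int × Int × Int)
    (hx : x ∈ sE d students) (hy : y ∈ E) (hk : evKey y < evKey x) : x ∈ E := by
  rw [h] at hx
  rcases List.mem_append.mp hx with hp | he
  · have hpw : (P ++ E).Pairwise (fun a b => evKey a < evKey b) := by
      rw [← h]; exact sE_pairwise d students
    exact absurd ((List.pairwise_append.mp hpw).2.2 x hp y hy) (lt_asymm hk)
  · exact he

theorem start_mem_allE (d : Int) (students : List Int) (p : Int × Int)
    (hp : p ∈ PySem.List.enumerate students 0) : (p.2, (-1 : Int), p.1) ∈ allE d students := by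
  rw [allE, List.mem_flatMap]
  exact ⟨p, hp, by simp⟩

theorem end_mem_allE (d : Int) (students : List Int) (p : Int × Int)
    (hp : p ∈ PySem.List.enumerate students 0) :
    (p.2 + d, (1 : Int), p.1) ∈ allE d students := by
  rw [allE, List.mem_flatMap]
  exact ⟨p, hp, by simp⟩

theorem mem_allE_elim (d : Int) (students : List Int) (e : Int × Int × Int)
    (he : e ∈ allE d students) :
    ∃ p ∈ PySem.List.enumerate students 0,
      e = (p.2, (-1 : Int), p.1) ∨ e = (p.2 + d, (1 : Int), p.1) := by
  rw [allE, List.mem_flatMap] at he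
  rcases he with ⟨p, hp, hmem⟩
  simp only [List.mem_cons, List.not_mem_nil, or_false] at hmem
  exact ⟨p, hp, hmem⟩

theorem runA (d : Int) (students : List Int) (hd : 0 ≤ d) :
    ∀ (E P : List (Int × Int × Int)) (done : List ((Int × Int) × Int)) (todo : List (Int × Int)),
    sE d students = P ++ E →
    sY students = done.map (fun q => q.1) ++ todo →
    (∀ p ∈ PySem.List.enumerate students 0, ((p.2, (-1 : Int), p.1) ∈ E ↔ p ∈ todo)) →
    (∀ q ∈ done, q.1 ∈ PySem.List.enumerate students 0) →
    (∀ q ∈ done, q.2 ∈ rngT students) →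
    (pend d E done).Nodup →
    ∀ maxT : Int,
    ((E.foldl aStep (resO students done,
        (rngT students).filter (fun m => !decide (m ∈ pend d E done)), maxT)).1).map
        (fun o => o.getD 0)
      = (todo.foldl (pStep d students)
          (resI students done, done.map (fun q => (q.1.2, q.2)))).1 := by
  intro E
  induction E with
  | nil =>
    intro P done todo hL hys hstart hdmem htk hnd maxT
    have htodo : todo = [] := by
      rw [List.eq_nil_iff_forall_not_mem]
      intro x hx
      have hxe : x ∈ PySem.List.enumerate students 0 := by
        have hxy : x ∈ sY students := by rw [hys]; exact List.mem_append_right _ hx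
        exact (PySem.List.sorted_perm ..).mem_iff.mp hxy
      have := (hstart x hxe).mpr hx
      simp at this
    subst htodo
    simpa using map_getD_resO students done
  | cons e E' ih =>
    intro P done todo hL hys hstart hdmem htk hnd maxT
    have hLpw := sE_pairwise d students
    have hLperm : (sE d students).Perm (allE d students) := PySem.List.sorted_perm ..
    have hYperm : (sY students).Perm (PySem.List.enumerate students 0) :=
      PySem.List.sorted_perm ..
    have heE : e ∈ sE d students := by rw [hL]; exact List.mem_append_right _ (by simp)
    have heAll : e ∈ allE d students := hLperm.mem_iff.mp heE
    obtain ⟨p0, hp0enum, hcase⟩ := mem_allE_elim d students e heAll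
    have hconsPw : (e :: E').Pairwise (fun a b => evKey a < evKey b) := by
      have hpw : (P ++ e :: E').Pairwise (fun a b => evKey a < evKey b) := by
        rw [← hL]; exact hLpw
      exact (List.pairwise_append.mp hpw).2.1
    have heE' : ∀ x ∈ E', evKey e < evKey x := (List.pairwise_cons.mp hconsPw).1
    have henotE' : e ∉ E' := fun hx => lt_irrefl _ (heE' e hx)
    have hL' : sE d students = (P ++ [e]) ++ E' := by rw [hL]; simp
    have hrngpw : (rngT students).Pairwise (· < ·) := PySem.List.pairwise_lt_pyRange_one ..
    have hrnglen : (rngT students).length = students.length := by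
      rw [rngT, PySem.List.length_pyRange_one]; omega
    rcases hcase with hSTART | hEND
    · -- START event
      subst hSTART
      have hp0todo : p0 ∈ todo := (hstart p0 hp0enum).mp (List.mem_cons_self ..)
      cases todo with
      | nil => exact absurd hp0todo (by simp)
      | cons q todo' =>
        have htodopw : ((q :: todo') : List (Int × Int)).Pairwise (fun a b => stKey a < stKey b) := by
          have hpw := sY_pairwise students
          rw [hys] at hpw
          exact (List.pairwise_append.mp hpw).2.1
        have hq : q = p0 := by
          by_contra hne
          have hp0' : p0 ∈ todo' := by
            rcases List.mem_cons.mp hp0todo with h | h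
            · exact absurd h.symm hne
            · exact h
          have hqenum : q ∈ PySem.List.enumerate students 0 :=
            hYperm.mem_iff.mp (by rw [hys]; exact List.mem_append_right _ (by simp))
          have hkey : stKey q < stKey p0 := (List.pairwise_cons.mp htodopw).1 p0 hp0'
          have hSq : ((q.2, (-1 : Int), q.1)) ∈ (p0.2, (-1 : Int), p0.1) :: E' :=
            (hstart q hqenum).mpr (by simp)
          have hSqne : ((q.2, (-1 : Int), q.1)) ≠ ((p0.2, (-1 : Int), p0.1)) := by
            intro hc
            exact hne (Prod.ext (congrArg (fun z => z.2.2) hc) (congrArg Prod.fst hc))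
          have hSqE' : ((q.2, (-1 : Int), q.1)) ∈ E' := by
            rcases List.mem_cons.mp hSq with h | h
            · exact absurd h hSqne
            · exact h
          have h1 := heE' _ hSqE'
          have h2 : evKey ((q.2, (-1 : Int), q.1)) < evKey ((p0.2, (-1 : Int), p0.1)) := by
            rw [evKey_lt_iff]
            rcases (stKey_lt_iff q p0).mp hkey with h | h
            · exact Or.inl h
            · exact Or.inr ⟨h.1, Or.inr ⟨rfl, h.2⟩⟩
          exact absurd h1 (lt_asymm h2)
        subst hq
        -- heap is nonempty
        have hpendlen : (pend d ((q.2, (-1 : Int), q.1) :: E') done).length ≤ done.length := by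
          rw [pend, List.length_map]
          exact List.length_filter_le ..
        have hlen1 : done.length + (todo'.length + 1) = students.length := by
          have h1 := hYperm.length_eq
          rw [hys, PySem.List.length_enumerate] at h1
          simpa [List.length_append] using h1
        have hrngnd : (rngT students).Nodup := hrngpw.nodup
        have hneheap :
            (rngT students).filter
              (fun m => !decide (m ∈ pend d ((q.2, (-1 : Int), q.1) :: E') done)) ≠ [] := by
          intro hc
          rw [List.filter_eq_nil_iff] at hc
          have hsub : rngT students ⊆ pend d ((q.2, (-1 : Int), q.1) :: E') done := by
            intro m hm
            have := hc m hm
            simpa using this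
          have hle := (hrngnd.subperm hsub).length_le
          omega
        obtain ⟨t0, hrest, hheap⟩ :
            ∃ t0 hrest, (rngT students).filter
              (fun m => !decide (m ∈ pend d ((q.2, (-1 : Int), q.1) :: E') done)) = t0 :: hrest := by
          cases hfe : (rngT students).filter
              (fun m => !decide (m ∈ pend d ((q.2, (-1 : Int), q.1) :: E') done)) with
          | nil => exact absurd hfe hneheap
          | cons a b => exact ⟨a, b, rfl⟩
        have ht0mem := List.mem_filter.mp (hheap ▸ List.mem_cons_self ..)
        have ht0rng : t0 ∈ rngT students := ht0mem.1
        have ht0pend : t0 ∉ pend d ((q.2, (-1 : Int), q.1) :: E') done := by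
          have := ht0mem.2; simpa using this
        -- END event of q is in E'
        have hENDq : ((q.2 + d, (1 : Int), q.1)) ∈ E' := by
          have hk : evKey ((q.2, (-1 : Int), q.1)) < evKey ((q.2 + d, (1 : Int), q.1)) := by
            rw [evKey_lt_iff]; dsimp; omega
          have hmem : ((q.2 + d, (1 : Int), q.1)) ∈ sE d students :=
            hLperm.mem_iff.mpr (end_mem_allE d students q hp0enum)
          have hin := mem_suffix_of_key_gt d students P ((q.2, (-1 : Int), q.1) :: E') hL
            ((q.2 + d, (1 : Int), q.1)) ((q.2, (-1 : Int), q.1)) hmem (List.mem_cons_self ..) hk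
          rcases List.mem_cons.mp hin with h | h
          · exact absurd (congrArg (fun z => z.2.1) h) (by norm_num)
          · exact h
        -- pend over E' of old done is unchanged
        have hpendE : pend d E' done = pend d ((q.2, (-1 : Int), q.1) :: E') done := by
          rw [pend, pend]
          congr 1
          apply List.filter_congr
          intro x hx
          have hxne : ((x.1.2 + d, (1 : Int), x.1.1)) ≠ ((q.2, (-1 : Int), q.1)) := by
            intro hc
            exact absurd (congrArg (fun z => z.2.1) hc) (by norm_num)
          simp [hxne]
        have hpend' : pend d E' (done ++ [(q, t0)]) =
            pend d ((q.2, (-1 : Int), q.1) :: E') done ++ [t0] := by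
          rw [pend, List.filter_append, List.map_append, ← pend, hpendE]
          congr 1
          simp [hENDq]
        -- tail of the heap
        have hrest_eq : hrest = (rngT students).filter
            (fun m => !decide (m ∈ pend d E' (done ++ [(q, t0)]))) := by
          rw [filter_cons_tail (rngT students) hrngpw _ t0 hrest hheap]
          apply List.filter_congr
          intro m hm
          by_cases h1 : m ∈ pend d ((q.2, (-1 : Int), q.1) :: E') done <;>
            by_cases h2 : m = t0 <;> simp [hpend', h1, h2]
        -- the ticket B assigns equals t0
        have hfilt_used : (done.filter (fun x => decide (q.2 ≤ x.1.2 + d))) =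
            (done.filter (fun x => decide ((x.1.2 + d, (1 : Int), x.1.1) ∈
              (q.2, (-1 : Int), q.1) :: E'))) := by
          apply List.filter_congr
          intro x hx
          have hiff : ((x.1.2 + d, (1 : Int), x.1.1) ∈ (q.2, (-1 : Int), q.1) :: E') ↔
              q.2 ≤ x.1.2 + d := by
            constructor
            · intro hin
              rcases List.mem_cons.mp hin with h | h
              · exact absurd (congrArg (fun z => z.2.1) h) (by norm_num)
              · have := heE' _ h
                rw [evKey_lt_iff] at this
                dsimp at this
                omega
            · intro hle
              have hk : evKey ((q.2, (-1 : Int), q.1)) < evKey ((x.1.2 + d, (1 : Int), x.1.1)) := by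
                rw [evKey_lt_iff]; dsimp; omega
              have hmem : ((x.1.2 + d, (1 : Int), x.1.1)) ∈ sE d students :=
                hLperm.mem_iff.mpr (end_mem_allE d students x.1 (hdmem x hx))
              exact mem_suffix_of_key_gt d students P ((q.2, (-1 : Int), q.1) :: E') hL
                _ _ hmem (List.mem_cons_self ..) hk
          simp [hiff]
        have htB : ((rngT students).filter (fun m =>
            !(PySem.Set.contains (PySem.Set.ofList
              (((done.map (fun x => (x.1.2, x.2))).filter
                (fun x => decide (q.2 ≤ x.1 + d))).map Prod.snd)) m))).headD 0 = t0 := by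
          have hmaps : (((done.map (fun x => (x.1.2, x.2))).filter
              (fun x => decide (q.2 ≤ x.1 + d))).map Prod.snd)
              = pend d ((q.2, (-1 : Int), q.1) :: E') done := by
            rw [List.filter_map, List.map_map, pend, ← hfilt_used]
            rfl
          rw [hmaps]
          have : ((rngT students).filter (fun m =>
              !(PySem.Set.contains (PySem.Set.ofList
                (pend d ((q.2, (-1 : Int), q.1) :: E') done)) m)))
              = (rngT students).filter
                (fun m => !decide (m ∈ pend d ((q.2, (-1 : Int), q.1) :: E') done)) := by
            apply List.filter_congr
            intro m hm
            by_cases h1 : m ∈ pend d ((q.2, (-1 : Int), q.1) :: E') done <;>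
              simp [PySem.Set.contains, PySem.Set.mem_ofList, h1]
          rw [this, hheap]
          rfl
        -- new invariants
        have hys' : sY students = ((done ++ [(q, t0)]).map (fun x => x.1)) ++ todo' := by
          rw [hys]; simp
        have hstart' : ∀ p ∈ PySem.List.enumerate students 0,
            ((p.2, (-1 : Int), p.1) ∈ E' ↔ p ∈ todo') := by
          intro p hp
          by_cases hpp : p = q
          · subst hpp
            have hnot1 : ((p.2, (-1 : Int), p.1)) ∉ E' := henotE'
            have hnot2 : p ∉ todo' := by
              intro hin
              exact lt_irrefl _ ((List.pairwise_cons.mp htodopw).1 p hin)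
            exact iff_of_false hnot1 hnot2
          · have h1 : ((p.2, (-1 : Int), p.1)) ≠ ((q.2, (-1 : Int), q.1)) := by
              intro hc
              have h3 : p.1 = q.1 := congrArg (fun z => z.2.2) hc
              exact hpp (List.inj_on_of_nodup_map (enum_fst_nodup students) hp hp0enum h3)
            constructor
            · intro hin
              have := (hstart p hp).mp (List.mem_cons_of_mem _ hin)
              rcases List.mem_cons.mp this with h | h
              · exact absurd h hpp
              · exact h
            · intro hin
              have := (hstart p hp).mpr (List.mem_cons_of_mem _ hin)
              rcases List.mem_cons.mp this with h | h
              · exact absurd h h1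
              · exact h
        have hdmem' : ∀ x ∈ done ++ [(q, t0)], x.1 ∈ PySem.List.enumerate students 0 := by
          intro x hx
          rcases List.mem_append.mp hx with h | h
          · exact hdmem x h
          · simp at h; subst h; exact hp0enum
        have htk' : ∀ x ∈ done ++ [(q, t0)], x.2 ∈ rngT students := by
          intro x hx
          rcases List.mem_append.mp hx with h | h
          · exact htk x h
          · simp at h; subst h; exact ht0rng
        have hnd' : (pend d E' (done ++ [(q, t0)])).Nodup := by
          rw [hpend', List.nodup_append]
          refine ⟨hnd, List.nodup_singleton _, fun a ha b hb => ?_⟩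
          simp only [List.mem_singleton] at hb
          subst hb
          exact fun hc => ht0pend (hc ▸ ha)
        -- put the step together
        have hstep := ih (P ++ [(q.2, (-1 : Int), q.1)]) (done ++ [(q, t0)]) todo'
          hL' hys' hstart' hdmem' htk' hnd' (max t0 maxT)
        rw [List.foldl_cons, List.foldl_cons]
        rw [aStep_start, hheap]
        simp only [List.headD_cons, List.tail_cons]
        have hpstep : pStep d students
            (resI students done, done.map (fun x => (x.1.2, x.2))) q =
            ((resI students done).set q.1.toNat t0,
              done.map (fun x => (x.1.2, x.2)) ++ [(q.2, t0)]) := by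
          simp only [pStep]
          rw [htB]
        rw [hpstep]
        rw [resO_append, resI_append, ← hrest_eq] at hstep
        simpa using hstep
    · -- END event
      subst hEND
      have hkSE : evKey ((p0.2, (-1 : Int), p0.1)) < evKey ((p0.2 + d, (1 : Int), p0.1)) := by
        rw [evKey_lt_iff]; dsimp; omega
      have hnotinE : ((p0.2, (-1 : Int), p0.1)) ∉ (p0.2 + d, (1 : Int), p0.1) :: E' := by
        intro hin
        rcases List.mem_cons.mp hin with h | h
        · exact absurd (congrArg (fun z => z.2.1) h) (by norm_num)
        · exact absurd (heE' _ h) (lt_asymm hkSE)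
      have hp0nottodo : p0 ∉ todo := fun h => hnotinE ((hstart p0 hp0enum).mpr h)
      obtain ⟨dq, hdq, hdqp⟩ : ∃ dq ∈ done, dq.1 = p0 := by
        have hp0Y : p0 ∈ sY students := hYperm.mem_iff.mpr hp0enum
        rw [hys] at hp0Y
        rcases List.mem_append.mp hp0Y with h | h
        · rcases List.mem_map.mp h with ⟨dq, hdq, hdqe⟩
          exact ⟨dq, hdq, hdqe⟩
        · exact absurd h hp0nottodo
      have hmapnd : (done.map (fun x => x.1)).Nodup := by
        have hYnd : (sY students).Nodup := hYperm.nodup_iff.mpr (enum_nodup students)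
        rw [hys] at hYnd
        exact (List.nodup_append.mp hYnd).1
      have hinj1 : ∀ a ∈ done, ∀ b ∈ done, a.1.1 = b.1.1 → a = b := by
        intro a ha b hb hab
        have h1 : a.1 = b.1 :=
          List.inj_on_of_nodup_map (enum_fst_nodup students) (hdmem a ha) (hdmem b hb) hab
        exact List.inj_on_of_nodup_map hmapnd ha hb h1
      have hrange : ∀ a ∈ done, 0 ≤ a.1.1 ∧ a.1.1.toNat < students.length := by
        intro a ha
        have := enum_spec students a.1 (hdmem a ha)
        exact ⟨this.1, this.2.1⟩
      have hread : (resO students done).getD p0.1.toNat none = some dq.2 := by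
        rw [← hdqp]
        exact getD_resO students done dq hdq hinj1 hrange
      have hENDdq : ((dq.1.2 + d, (1 : Int), dq.1.1)) =
          ((p0.2 + d, (1 : Int), p0.1)) := by rw [hdqp]
      have ht_pend : dq.2 ∈ pend d ((p0.2 + d, (1 : Int), p0.1) :: E') done := by
        rw [pend]
        apply List.mem_map.mpr
        refine ⟨dq, List.mem_filter.mpr ⟨hdq, ?_⟩, rfl⟩
        simp [hENDdq]
      have hiff : ∀ m, m ∈ pend d E' done ↔
          (m ∈ pend d ((p0.2 + d, (1 : Int), p0.1) :: E') done ∧ m ≠ dq.2) := by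
        intro m
        constructor
        · intro hin
          rw [pend] at hin
          rcases List.mem_map.mp hin with ⟨x, hxf, hxm⟩
          rcases List.mem_filter.mp hxf with ⟨hxd, hxE⟩
          have hxE' : ((x.1.2 + d, (1 : Int), x.1.1)) ∈ E' := by simpa using hxE
          have hxne : x ≠ dq := by
            intro hc
            subst hc
            rw [hENDdq] at hxE'
            exact henotE' hxE'
          constructor
          · rw [pend]
            refine List.mem_map.mpr ⟨x, List.mem_filter.mpr ⟨hxd, ?_⟩, hxm⟩
            simp
            exact Or.inr hxE'
          · intro hc
            -- two distinct pending entries with the same ticket contradict Nodup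
            have hx2 : x ∈ done.filter
                (fun y => decide ((y.1.2 + d, (1 : Int), y.1.1) ∈
                  (p0.2 + d, (1 : Int), p0.1) :: E')) :=
              List.mem_filter.mpr ⟨hxd, by simp; exact Or.inr hxE'⟩
            have hdq2 : dq ∈ done.filter
                (fun y => decide ((y.1.2 + d, (1 : Int), y.1.1) ∈
                  (p0.2 + d, (1 : Int), p0.1) :: E')) :=
              List.mem_filter.mpr ⟨hdq, by simp [hENDdq]⟩
            have := List.inj_on_of_nodup_map (by rw [pend] at hnd; exact hnd) hx2 hdq2
              (by rw [hxm, hc])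
            exact hxne this
        · rintro ⟨hin, hne⟩
          rw [pend] at hin
          rcases List.mem_map.mp hin with ⟨x, hxf, hxm⟩
          rcases List.mem_filter.mp hxf with ⟨hxd, hxE⟩
          have hxdq : x ≠ dq := by
            intro hc; subst hc; exact hne hxm.symm
          have hxE2 : ((x.1.2 + d, (1 : Int), x.1.1)) ∈ (p0.2 + d, (1 : Int), p0.1) :: E' := by
            simpa using hxE
          have hxE' : ((x.1.2 + d, (1 : Int), x.1.1)) ∈ E' := by
            rcases List.mem_cons.mp hxE2 with h | h
            · exfalso
              have h31 : x.1.1 = p0.1 := congrArg (fun z => z.2.2) h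
              have : x.1.1 = dq.1.1 := by rw [h31, hdqp]
              exact hxdq (hinj1 x hxd dq hdq this)
            · exact h
          rw [pend]
          refine List.mem_map.mpr ⟨x, List.mem_filter.mpr ⟨hxd, by simp [hxE']⟩, hxm⟩
      have hpush : pyHeapPush dq.2 ((rngT students).filter
            (fun m => !decide (m ∈ pend d ((p0.2 + d, (1 : Int), p0.1) :: E') done)))
          = (rngT students).filter (fun m => !decide (m ∈ pend d E' done)) := by
        rw [heapPush_filter (rngT students) hrngpw _ dq.2 (htk dq hdq) (by simp [ht_pend])]
        have hdq2n : dq.2 ∉ pend d E' done := fun hc => ((hiff dq.2).mp hc).2 rfl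
        apply List.filter_congr
        intro m hm
        by_cases h1 : m ∈ pend d ((p0.2 + d, (1 : Int), p0.1) :: E') done <;>
          by_cases h2 : m = dq.2 <;> simp [hiff m, h1, h2, hdq2n]
      have hnd' : (pend d E' done).Nodup := by
        have hsub : List.Sublist (done.filter (fun y => decide ((y.1.2 + d, (1 : Int), y.1.1) ∈ E')))
            (done.filter (fun y => decide ((y.1.2 + d, (1 : Int), y.1.1) ∈
              (p0.2 + d, (1 : Int), p0.1) :: E'))) := by
          apply List.monotone_filter_right
          intro x hx
          simp at hx ⊢
          exact Or.inr hx
        rw [pend] at hnd ⊢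
        exact (hsub.map (fun y => y.2)).nodup hnd
      have hstart' : ∀ p ∈ PySem.List.enumerate students 0,
          ((p.2, (-1 : Int), p.1) ∈ E' ↔ p ∈ todo) := by
        intro p hp
        have h1 : ((p.2, (-1 : Int), p.1)) ≠ ((p0.2 + d, (1 : Int), p0.1)) := by
          intro hc
          exact absurd (congrArg (fun z => z.2.1) hc) (by norm_num)
        rw [← hstart p hp]
        constructor
        · exact List.mem_cons_of_mem _
        · intro hin
          rcases List.mem_cons.mp hin with h | h
          · exact absurd h h1
          · exact h
      have hstep := ih (P ++ [(p0.2 + d, (1 : Int), p0.1)]) done todo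
        hL' hys hstart' hdmem htk hnd' maxT
      rw [List.foldl_cons, aStep_end, hread]
      simp only [Option.getD_some]
      rw [hpush]
      exact hstep

theorem order_eq (students : List Int) :
    PySem.List.sorted (PySem.List.pyRange 0 (students.length : Int) 1)
      (fun i => toLex ((PySem.List.pyGetD students i 0, i) : Int × Int)) false
      = (sY students).map Prod.fst := by
  have hYperm : (sY students).Perm (PySem.List.enumerate students 0) :=
    PySem.List.sorted_perm ..
  apply PySem.List.sorted_eq_of_perm_of_pairwise_lt
  · have h1 : ((sY students).map Prod.fst).Perm
        ((PySem.List.enumerate students 0).map Prod.fst) := hYperm.map _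
    rw [PySem.List.map_fst_enumerate] at h1
    simpa using h1
  · rw [List.pairwise_map]
    apply (sY_pairwise students).imp_of_mem
    intro a b ha hb hlt
    have hae := enum_spec students a (hYperm.mem_iff.mp ha)
    have hbe := enum_spec students b (hYperm.mem_iff.mp hb)
    rw [hae.2.2, hbe.2.2]
    exact hlt

theorem main_equiv (d : Int) (students : List Int) (hd : 0 ≤ d) :
    findTicketsNumber d students = findTicketsNumber_alt d students := by
  have hYperm : (sY students).Perm (PySem.List.enumerate students 0) :=
    PySem.List.sorted_perm ..
  have hLperm : (sE d students).Perm (allE d students) := PySem.List.sorted_perm ..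
  -- A as a fold over the sorted event list
  have hA : findTicketsNumber d students =
      ((sE d students).foldl aStep (List.replicate students.length none,
        PySem.List.pyRange 1 ((students.length : Int) + 1) 1, 0)).1.map (fun o => o.getD 0) := by
    simp only [findTicketsNumber]
    rw [PySem.List.foldl_append_eq_flatMap]
    rfl
  -- B as a fold over the sorted student list
  have hB : findTicketsNumber_alt d students =
      ((sY students).foldl (pStep d students) (List.replicate students.length 0, [])).1 := by
    simp only [findTicketsNumber_alt]
    rw [order_eq students, List.foldl_map]
    congr 1
    apply List.foldl_ext
    intro st p hp
    have hs := (enum_spec students p (hYperm.mem_iff.mp hp)).2.2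
    simp only [bStep, pStep, rngT]
    rw [hs]
  -- initial state of the invariant
  have hinit : (rngT students).filter
      (fun m => !decide (m ∈ pend d (sE d students) ([] : List ((Int × Int) × Int))))
      = rngT students := by
    simp [pend]
  have hrun := runA d students hd (sE d students) [] [] (sY students) rfl (by simp)
    (fun p hp => iff_of_true (hLperm.mem_iff.mpr (start_mem_allE d students p hp))
      (hYperm.mem_iff.mpr hp))
    (by simp) (by simp) (by simp [pend]) 0
  rw [hinit] at hrun
  rw [hA, hB]
  simpa [resO, resI, rngT] using hrun

-- ===== VERDICT (by name: the statement is the Claim_ definition above) =====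
theorem findTicketsNumber_spec : Claim_equal_findTicketsNumber := by
  intro d students _hDom hPre
  unfold Spec_findTicketsNumber
  rcases hPre with hd | hnil
  · exact main_equiv d students hd
  · subst hnil; rfl
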